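-- pv_equiv track=rewrite | github.com/EOued/Projet_Stade | QT_APP/utils.py | int_to_time_periods
-- ===== SOURCE A (Python) =====
-- def int_to_time_periods(x: int, ftype: int) -> set[tuple[int, int, int]]:
--     periods = set()
--     start = None
--
--     for i in range(24):
--         if (x >> i) & 1:
--             if start is None:
--                 start = i
--         else:
--             if start is not None:
--                 periods.add((start, i, (ftype >> i - 1) & 1))
--                 start = None
--
--     if start is not None:
--         periods.add((start, 0, (ftype >> 23) & 1))
--
--     return periods
-- ===== SOURCE B (Python) =====
-- def int_to_time_periods(x: int, ftype: int) -> set[tuple[int, int, int]]: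
--     """Locate each run of set bits directly: a start is a 1-bit whose lower
--     neighbour is 0; scan forward for its end; the wraparound case is the
--     closed form e % 24 instead of a post-loop branch."""
--     periods = set()
--     for s in range(24):
--         if (x >> s) & 1 and not (s > 0 and (x >> (s - 1)) & 1):
--             e = s + 1
--             while e < 24 and (x >> e) & 1:
--                 e += 1
--             periods.add((s, e % 24, (ftype >> (e - 1)) & 1))
--     return periods
-- ===== Notes on version B (the rewrite author's own statement) =====
-- stated objective: alternative
-- what changed: Replaces A's single stateful pass (pending-start Option state plus a post-loop wraparound branch) with a direct run finder: each run start is detected by a neighbour-bit test, its end by an inner forward scan, and the wraparound end is the closed form e % 24.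
import Mathlib
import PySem

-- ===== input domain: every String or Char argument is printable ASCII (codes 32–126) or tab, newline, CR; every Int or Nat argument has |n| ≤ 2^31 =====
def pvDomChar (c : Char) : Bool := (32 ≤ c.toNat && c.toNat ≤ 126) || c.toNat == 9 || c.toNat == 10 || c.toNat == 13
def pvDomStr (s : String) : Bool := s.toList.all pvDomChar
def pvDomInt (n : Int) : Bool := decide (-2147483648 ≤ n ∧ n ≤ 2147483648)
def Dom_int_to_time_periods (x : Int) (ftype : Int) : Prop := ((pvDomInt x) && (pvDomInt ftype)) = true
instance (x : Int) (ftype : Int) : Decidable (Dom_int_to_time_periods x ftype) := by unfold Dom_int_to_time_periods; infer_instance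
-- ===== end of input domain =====

-- B replaces A's stateful run tracker (pending-start state + post-loop wraparound branch)
-- with direct run detection (neighbour-bit start test, inner end scan, closed-form e % 24);
-- same cost, alternative structure.

-- ===== PORT A =====
-- loop body of A's for-loop, named for the fold
def pvStepA (x : Int) (ftype : Int) (st : List (Int × Int × Int) × Option Int) (i : Int) :
    List (Int × Int × Int) × Option Int :=
  if PySem.Int.band (x >>> i.toNat) 1 ≠ 0 then
    match st.2 with
    | none => (st.1, some i)
    | some _ => st
  else
    match st.2 with
    | some start => (PySem.Set.add st.1 (start, i, PySem.Int.band (ftype >>> (i - 1).toNat) 1), none)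
    | none => st

def int_to_time_periods (x : Int) (ftype : Int) : List (Int × Int × Int) :=
  let r := (PySem.List.pyRange 0 24 1).foldl (pvStepA x ftype) (PySem.Set.empty, none)
  match r.2 with
  | some start => PySem.Set.add r.1 (start, 0, PySem.Int.band (ftype >>> (23 : Nat)) 1)
  | none => r.1

-- ===== PORT B =====
-- inner 'while e < 24 and (x >> e) & 1: e += 1' of Source B; e kept as a Nat (e starts at s+1 ≥ 1
-- and only grows, so this is exact for the Python int e)
def pvRunEnd (x : Int) (e : Nat) : Nat :=
  if e < 24 ∧ PySem.Int.band (x >>> e) 1 ≠ 0 then pvRunEnd x (e + 1) else e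
termination_by 24 - e
decreasing_by omega

-- loop body of Source B's for-loop, named for the fold
def pvStepB (x : Int) (ftype : Int) (periods : List (Int × Int × Int)) (s : Int) :
    List (Int × Int × Int) :=
  if PySem.Int.band (x >>> s.toNat) 1 ≠ 0 ∧ ¬ (s > 0 ∧ PySem.Int.band (x >>> (s - 1).toNat) 1 ≠ 0) then
    let e : Int := (pvRunEnd x (s.toNat + 1) : Nat)
    PySem.Set.add periods (s, PySem.Int.mod e 24, PySem.Int.band (ftype >>> (e - 1).toNat) 1)
  else periods

def int_to_time_periods_alt (x : Int) (ftype : Int) : List (Int × Int × Int) :=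
  (PySem.List.pyRange 0 24 1).foldl (pvStepB x ftype) PySem.Set.empty

-- ===== PRECONDITION & SPEC =====
def Spec_int_to_time_periods (x : Int) (ftype : Int) (out : List (Int × Int × Int)) : Prop := out = int_to_time_periods_alt x ftype
instance (x : Int) (ftype : Int) (out : List (Int × Int × Int)) : Decidable (Spec_int_to_time_periods x ftype out) := by unfold Spec_int_to_time_periods; infer_instance

-- ===== CLAIM (what is proved, stated in full; the proofs are below) =====
def Claim_equal_int_to_time_periods : Prop := ∀ (x : Int) (ftype : Int), Dom_int_to_time_periods x ftype → Spec_int_to_time_periods x ftype (int_to_time_periods x ftype)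

-- ===== LEMMAS AND PROOFS =====

-- A's post-loop finalization
def pvFinishA (ftype : Int) (r : List (Int × Int × Int) × Option Int) : List (Int × Int × Int) :=
  match r.2 with
  | some start => PySem.Set.add r.1 (start, 0, PySem.Int.band (ftype >>> (23 : Nat)) 1)
  | none => r.1

lemma pvRunEnd_ge (x : Int) (e : Nat) : e ≤ pvRunEnd x e := by
  fun_induction pvRunEnd x e with
  | case1 e h ih => omega
  | case2 e h => omega

lemma pvRunEnd_of_neg (x : Int) (e : Nat) (h : ¬ (e < 24 ∧ PySem.Int.band (x >>> e) 1 ≠ 0)) :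
    pvRunEnd x e = e := by
  rw [pvRunEnd, if_neg h]

lemma pvRunEnd_of_pos (x : Int) (e : Nat) (h : e < 24 ∧ PySem.Int.band (x >>> e) 1 ≠ 0) :
    pvRunEnd x e = pvRunEnd x (e + 1) := by
  rw [pvRunEnd, if_pos h]

lemma pvMod_small (k : Nat) (h : k < 24) : PySem.Int.mod (k : Int) 24 = (k : Int) := by
  simp [PySem.Int.mod, Int.fmod_eq_emod]
  omega

-- the joint loop invariant: A's fold-then-finalize equals B's fold, both over range k..24,
-- for a state with no pending run (left) and with a pending run started at s (right)
lemma pvInv (x : Int) (ftype : Int) :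
    ∀ n k : Nat, k + n = 24 →
      ((k = 0 ∨ PySem.Int.band (x >>> (k - 1)) 1 = 0) →
        ∀ acc, pvFinishA ftype ((PySem.List.pyRange (k : Int) 24 1).foldl (pvStepA x ftype) (acc, none))
          = (PySem.List.pyRange (k : Int) 24 1).foldl (pvStepB x ftype) acc) ∧
      (1 ≤ k → PySem.Int.band (x >>> (k - 1)) 1 ≠ 0 →
        ∀ acc (s : Int), pvFinishA ftype ((PySem.List.pyRange (k : Int) 24 1).foldl (pvStepA x ftype) (acc, some s))
          = (PySem.List.pyRange (k : Int) 24 1).foldl (pvStepB x ftype)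
              (PySem.Set.add acc (s, PySem.Int.mod (pvRunEnd x k : Int) 24,
                 PySem.Int.band (ftype >>> (pvRunEnd x k - 1)) 1))) := by
  intro n
  induction n with
  | zero =>
    intro k hk
    have hk24 : k = 24 := by omega
    subst hk24
    have hr : PySem.List.pyRange ((24 : Nat) : Int) 24 1 = [] := by decide
    constructor
    · intro _ acc
      rw [hr]
      simp [pvFinishA]
    · intro _ _ acc s
      rw [hr]
      have he : pvRunEnd x 24 = 24 := pvRunEnd_of_neg x 24 (by omega)
      simp only [List.foldl_nil, pvFinishA, he]
      norm_num
  | succ n ih =>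
    intro k hk
    have hk24 : k < 24 := by omega
    have hcons : PySem.List.pyRange (k : Int) 24 1 = (k : Int) :: PySem.List.pyRange ((k : Int) + 1) 24 1 :=
      PySem.List.pyRange_one_cons (by omega)
    have hcast : ((k : Int) + 1) = ((k + 1 : Nat) : Int) := by push_cast; ring
    obtain ⟨ihn, ihs⟩ := ih (k + 1) (by omega)
    have hge : k + 1 ≤ pvRunEnd x (k + 1) := pvRunEnd_ge x (k + 1)
    have htn : ((pvRunEnd x (k + 1) : Int) - 1).toNat = pvRunEnd x (k + 1) - 1 := by omega
    have hk1' : ((k : Int) - 1).toNat = k - 1 := by omega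
    constructor
    · -- no pending run at k
      intro hpre acc
      rw [hcons, List.foldl_cons, List.foldl_cons]
      by_cases hb : PySem.Int.band (x >>> k) 1 = 0
      · have hA : pvStepA x ftype (acc, none) (k : Int) = (acc, none) := by
          simp [pvStepA, hb]
        have hB : pvStepB x ftype acc (k : Int) = acc := by
          simp [pvStepB, hb]
        rw [hA, hB, hcast]
        exact ihn (Or.inr (by simpa using hb)) acc
      · have hA : pvStepA x ftype (acc, none) (k : Int) = (acc, some (k : Int)) := by
          simp [pvStepA, hb]
        have hnostart : ¬ ((k : Int) > 0 ∧ PySem.Int.band (x >>> ((k : Int) - 1).toNat) 1 ≠ 0) := by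
          rcases hpre with h0 | hprev
          · subst h0; simp
          · intro ⟨hkpos, hne⟩
            rw [hk1'] at hne
            exact hne hprev
        have hB : pvStepB x ftype acc (k : Int) =
            PySem.Set.add acc ((k : Int), PySem.Int.mod (pvRunEnd x (k + 1) : Int) 24,
              PySem.Int.band (ftype >>> (pvRunEnd x (k + 1) - 1)) 1) := by
          simp only [pvStepB, Int.toNat_natCast, htn]
          rw [if_pos ⟨hb, hnostart⟩]
        rw [hA, hB, hcast]
        exact ihs (by omega) (by simpa using hb) acc (k : Int)
    · -- pending run started at s, bits set up to k-1
      intro hk1 hprev acc s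
      rw [hcons, List.foldl_cons, List.foldl_cons]
      by_cases hb : PySem.Int.band (x >>> k) 1 = 0
      · -- run ends at k
        have hA : pvStepA x ftype (acc, some s) (k : Int) =
            (PySem.Set.add acc (s, (k : Int), PySem.Int.band (ftype >>> (k - 1)) 1), none) := by
          simp [pvStepA, hb, hk1']
        have hB : ∀ a : List (Int × Int × Int), pvStepB x ftype a (k : Int) = a := by
          intro a
          simp only [pvStepB, Int.toNat_natCast]
          rw [if_neg]
          intro h
          exact h.1 hb
        have he : pvRunEnd x k = k := pvRunEnd_of_neg x k (by simp [hb])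
        rw [hA, hB, hcast, he, pvMod_small k hk24]
        exact ihn (Or.inr (by simpa using hb)) _
      · -- run continues through k
        have hA : pvStepA x ftype (acc, some s) (k : Int) = (acc, some s) := by
          simp [pvStepA, hb]
        have hstart : ((k : Int) > 0 ∧ PySem.Int.band (x >>> ((k : Int) - 1).toNat) 1 ≠ 0) := by
          constructor
          · exact_mod_cast Nat.pos_of_ne_zero (by omega)
          · rw [hk1']; exact hprev
        have hB : ∀ a : List (Int × Int × Int), pvStepB x ftype a (k : Int) = a := by
          intro a
          simp only [pvStepB, Int.toNat_natCast]
          rw [if_neg]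
          intro h
          exact h.2 hstart
        have he : pvRunEnd x k = pvRunEnd x (k + 1) := pvRunEnd_of_pos x k ⟨hk24, hb⟩
        rw [hA, hB, hcast, he]
        exact ihs (by omega) (by simpa using hb) acc s

-- ===== VERDICT (by name: the statement is the Claim_ definition above) =====
theorem int_to_time_periods_spec : Claim_equal_int_to_time_periods := by
  intro x ftype _
  unfold Spec_int_to_time_periods int_to_time_periods int_to_time_periods_alt
  have h := (pvInv x ftype 24 0 rfl).1 (Or.inl rfl) PySem.Set.empty
  simpa [pvFinishA] using h
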